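-- pv_equiv track=rewrite | github.com/RomainPastureau/Krajjat | tool_functions.py | rgb_color_to_hex
-- ===== SOURCE A (Python) =====
-- def rgb_color_to_hex(color, include_alpha=False):
--     """Converts a color from its RGB or RGBA value to its hexadecimal value.
--
--     Parameters
--     ----------
--     color: tuple(int, int, int) or tuple(int, int, int, int)
--         The RGB or RGBA value of a color.
--     include_alpha: bool, optional
--         If ``True``, returns the hexadecimal color with an alpha value. If an alpha value is not present in the
--         RGB value, the alpha channel will be set to ff.
--
--     Returns
--     -------
--     str
--         A hexadecimal value, with a leading number sign (``"#"``).
--     """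
--     for i in range(len(color)):
--         if color[i] < 0 or color[i] > 255:
--             raise Exception("Invalid color index.")
--
--     if len(color) == 3:
--         if include_alpha:
--             return '#%02x%02x%02xff' % color
--         else:
--             return '#%02x%02x%02x' % color
--
--     elif len(color) == 4:
--         if include_alpha:
--             return '#%02x%02x%02x%02x' % color
--         else:
--             color = color[0:3]
--             return '#%02x%02x%02x' % color
--
--     else:
--         raise Exception("Invalid number of arguments in the color.")
-- ===== SOURCE B (Python) =====
-- def rgb_color_to_hex(color, include_alpha=False):
--     """Converts a color from its RGB or RGBA value to its hexadecimal value."""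
--     for i in range(len(color)):
--         if color[i] < 0 or color[i] > 255:
--             raise Exception("Invalid color index.")
--
--     if len(color) not in (3, 4):
--         raise Exception("Invalid number of arguments in the color.")
--
--     base = color[0] * 65536 + color[1] * 256 + color[2]
--     if include_alpha:
--         alpha = color[3] if len(color) == 4 else 255
--         return '#%08x' % (base * 256 + alpha)
--     return '#%06x' % base
-- ===== Notes on version B (the rewrite author's own statement) =====
-- stated objective: alternative
-- what changed: Replaces the four template-selecting branches with one arithmetic packing of the channels into a single integer followed by a single fixed-width hex format.
import Mathlib
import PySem

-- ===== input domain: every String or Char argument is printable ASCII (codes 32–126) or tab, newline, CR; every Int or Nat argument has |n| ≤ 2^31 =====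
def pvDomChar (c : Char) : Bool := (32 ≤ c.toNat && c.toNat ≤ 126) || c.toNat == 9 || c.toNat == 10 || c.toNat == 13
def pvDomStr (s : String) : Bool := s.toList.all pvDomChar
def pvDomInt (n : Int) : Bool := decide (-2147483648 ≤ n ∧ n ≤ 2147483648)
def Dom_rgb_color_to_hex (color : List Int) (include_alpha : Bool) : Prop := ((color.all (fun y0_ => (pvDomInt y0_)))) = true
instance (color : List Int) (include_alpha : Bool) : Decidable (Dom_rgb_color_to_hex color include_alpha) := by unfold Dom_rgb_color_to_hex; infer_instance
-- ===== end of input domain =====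

-- B packs the three (or four) channels into one integer and formats it once with a
-- fixed-width hex format, instead of A's four template-selecting branches (objective: alternative).
-- A raises on out-of-range channels or a length other than 3/4; those inputs are outside Pre_.

-- ===== PORT A =====

-- Python's lowercase hex digit for n < 16 (exact there; only used with n < 16).
def hexChar (n : Nat) : Char := if n < 10 then Char.ofNat (48 + n) else Char.ofNat (87 + n)

-- the two digits of '%02x' % n, exact for 0 ≤ n ≤ 255 (guaranteed by Pre_ on every use).
def pyHex2 (n : Int) : List Char := [hexChar (n.toNat / 16), hexChar (n.toNat % 16)]

-- A's validation loop only raises (outside Pre_); under Pre_ it is a no-op, so the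
-- port goes straight to the branch on the length, exactly in A's order.
def rgb_color_to_hex (color : List Int) (include_alpha : Bool) : String :=
  if color.length = 3 then
    match color with    -- one format template: '#%02x%02x%02x(ff)' % color
    | [r, g, b] =>
      if include_alpha then String.mk ('#' :: (pyHex2 r ++ pyHex2 g ++ pyHex2 b ++ ['f', 'f']))
      else String.mk ('#' :: (pyHex2 r ++ pyHex2 g ++ pyHex2 b))
    | _ => ""          -- unreachable
  else if color.length = 4 then
    match color with
    | [r, g, b, a] =>
      if include_alpha then String.mk ('#' :: (pyHex2 r ++ pyHex2 g ++ pyHex2 b ++ pyHex2 a))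
      else String.mk ('#' :: (pyHex2 r ++ pyHex2 g ++ pyHex2 b))   -- color = color[0:3]
    | _ => ""          -- unreachable
  else ""              -- raise: outside Pre_

-- ===== PORT B =====

-- hex digits of n, least significant first ('%x' core; [] for 0).
def toHexRev (n : Nat) : List Char :=
  if h : n = 0 then [] else hexChar (n % 16) :: toHexRev (n / 16)
  decreasing_by exact Nat.div_lt_self (Nat.pos_of_ne_zero h) (by omega)

-- '#%0wx' % n : '#' then the digits of n left-padded with '0' to width w.
def fmtHex (w : Nat) (n : Nat) : String :=
  String.mk ('#' :: (List.replicate (w - (toHexRev n).reverse.length) '0' ++ (toHexRev n).reverse))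

-- transliteration of Source B: validation (raises only, outside Pre_), then pack and format once.
def rgb_color_to_hex_alt (color : List Int) (include_alpha : Bool) : String :=
  if color.length = 3 ∨ color.length = 4 then
    let base := (color.getD 0 0).toNat * 65536 + (color.getD 1 0).toNat * 256 + (color.getD 2 0).toNat
    if include_alpha then
      let alpha := if color.length = 4 then (color.getD 3 0).toNat else 255
      fmtHex 8 (base * 256 + alpha)
    else
      fmtHex 6 base
  else ""              -- raise: outside Pre_

-- ===== PRECONDITION & SPEC =====
-- Pre_ = exactly where A returns: length 3 or 4 and every channel between 0 and 255; elsewhere A raises.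
def Pre_rgb_color_to_hex (color : List Int) (include_alpha : Bool) : Prop :=
  (color.length = 3 ∨ color.length = 4) ∧ ∀ c ∈ color, 0 ≤ c ∧ c ≤ 255
instance (color : List Int) (include_alpha : Bool) : Decidable (Pre_rgb_color_to_hex color include_alpha) := by unfold Pre_rgb_color_to_hex; infer_instance

def pvWitness_rgb_color_to_hex : List Int × Bool := ([16, 32, 255], true)

def Spec_rgb_color_to_hex (color : List Int) (include_alpha : Bool) (out : String) : Prop := out = rgb_color_to_hex_alt color include_alpha
instance (color : List Int) (include_alpha : Bool) (out : String) : Decidable (Spec_rgb_color_to_hex color include_alpha out) := by unfold Spec_rgb_color_to_hex; infer_instance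

-- ===== CLAIM (what is proved, stated in full; the proofs are below) =====
def Claim_equal_rgb_color_to_hex : Prop := ∀ (color : List Int) (include_alpha : Bool), Dom_rgb_color_to_hex color include_alpha → Pre_rgb_color_to_hex color include_alpha → Spec_rgb_color_to_hex color include_alpha (rgb_color_to_hex color include_alpha)

-- ===== LEMMAS AND PROOFS =====

-- the padded digit list behind fmtHex
def padHex (w n : Nat) : List Char :=
  List.replicate (w - (toHexRev n).reverse.length) '0' ++ (toHexRev n).reverse

theorem fmtHex_eq (w n : Nat) : fmtHex w n = String.mk ('#' :: padHex w n) := rfl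

-- peel one (possibly leading-zero) digit off a fixed-width hex rendering
theorem padHex_succ (w n : Nat) : padHex (w + 1) n = padHex w (n / 16) ++ [hexChar (n % 16)] := by
  by_cases h : n = 0
  · subst h
    simp [padHex, toHexRev, hexChar, List.replicate_succ']
  · rw [padHex, padHex, toHexRev]
    simp only [h, dite_false, List.reverse_cons, List.length_append, List.length_reverse,
      List.length_cons, List.length_nil]
    rw [show w + 1 - ((toHexRev (n / 16)).length + 1) = w - (toHexRev (n / 16)).reverse.length by
      simp]
    simp [List.append_assoc]

theorem padHex_zero_zero : padHex 0 0 = [] := by simp [padHex, toHexRev]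

theorem padHex6 (x y z : Nat) (hx : x < 256) (hy : y < 256) (hz : z < 256) :
    padHex 6 (x * 65536 + y * 256 + z) =
      [hexChar (x / 16), hexChar (x % 16), hexChar (y / 16), hexChar (y % 16),
       hexChar (z / 16), hexChar (z % 16)] := by
  set N := x * 65536 + y * 256 + z with hN
  rw [show (6 : Nat) = 5 + 1 from rfl, padHex_succ,
      show (5 : Nat) = 4 + 1 from rfl, padHex_succ,
      show (4 : Nat) = 3 + 1 from rfl, padHex_succ,
      show (3 : Nat) = 2 + 1 from rfl, padHex_succ,
      show (2 : Nat) = 1 + 1 from rfl, padHex_succ,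
      show (1 : Nat) = 0 + 1 from rfl, padHex_succ]
  rw [show N / 16 / 16 / 16 / 16 / 16 / 16 = 0 by omega, padHex_zero_zero]
  rw [show N / 16 / 16 / 16 / 16 / 16 % 16 = x / 16 by omega,
      show N / 16 / 16 / 16 / 16 % 16 = x % 16 by omega,
      show N / 16 / 16 / 16 % 16 = y / 16 by omega,
      show N / 16 / 16 % 16 = y % 16 by omega,
      show N / 16 % 16 = z / 16 by omega,
      show N % 16 = z % 16 by omega]
  rfl

theorem padHex8 (b a : Nat) (hb : b < 16777216) (ha : a < 256) :
    padHex 8 (b * 256 + a) = padHex 6 b ++ [hexChar (a / 16), hexChar (a % 16)] := by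
  rw [show (8 : Nat) = 7 + 1 from rfl, padHex_succ,
      show (7 : Nat) = 6 + 1 from rfl, padHex_succ]
  rw [show (b * 256 + a) / 16 / 16 = b by omega,
      show (b * 256 + a) / 16 % 16 = a / 16 by omega,
      show (b * 256 + a) % 16 = a % 16 by omega]
  simp [List.append_assoc]

-- core agreement for a single triple/quadruple of in-range channels
theorem agree3 (r g b : Int) (ia : Bool)
    (hr : 0 ≤ r ∧ r ≤ 255) (hg : 0 ≤ g ∧ g ≤ 255) (hb : 0 ≤ b ∧ b ≤ 255) :
    rgb_color_to_hex [r, g, b] ia = rgb_color_to_hex_alt [r, g, b] ia := by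
  have hr' : r.toNat < 256 := by omega
  have hg' : g.toNat < 256 := by omega
  have hb' : b.toNat < 256 := by omega
  have hbase : r.toNat * 65536 + g.toNat * 256 + b.toNat < 16777216 := by omega
  cases ia <;>
    simp [rgb_color_to_hex, rgb_color_to_hex_alt, pyHex2, fmtHex_eq]
  · rw [padHex6 _ _ _ hr' hg' hb']
  · rw [padHex8 _ 255 hbase (by omega), padHex6 _ _ _ hr' hg' hb']
    simp [hexChar]

theorem agree4 (r g b a : Int) (ia : Bool)
    (hr : 0 ≤ r ∧ r ≤ 255) (hg : 0 ≤ g ∧ g ≤ 255) (hb : 0 ≤ b ∧ b ≤ 255)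
    (ha : 0 ≤ a ∧ a ≤ 255) :
    rgb_color_to_hex [r, g, b, a] ia = rgb_color_to_hex_alt [r, g, b, a] ia := by
  have hr' : r.toNat < 256 := by omega
  have hg' : g.toNat < 256 := by omega
  have hb' : b.toNat < 256 := by omega
  have ha' : a.toNat < 256 := by omega
  have hbase : r.toNat * 65536 + g.toNat * 256 + b.toNat < 16777216 := by omega
  cases ia <;>
    simp [rgb_color_to_hex, rgb_color_to_hex_alt, pyHex2, fmtHex_eq]
  · rw [padHex6 _ _ _ hr' hg' hb']
  · rw [padHex8 _ a.toNat hbase ha', padHex6 _ _ _ hr' hg' hb']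
    simp

-- ===== VERDICT (by name: the statement is the Claim_ definition above) =====
theorem rgb_color_to_hex_spec : Claim_equal_rgb_color_to_hex := by
  intro color ia _ hpre
  obtain ⟨hlen, hrange⟩ := hpre
  unfold Spec_rgb_color_to_hex
  rcases hlen with h3 | h4
  · match color, h3 with
    | [r, g, b], _ =>
      exact agree3 r g b ia (hrange r (by simp)) (hrange g (by simp)) (hrange b (by simp))
  · match color, h4 with
    | [r, g, b, a], _ =>
      exact agree4 r g b a ia (hrange r (by simp)) (hrange g (by simp)) (hrange b (by simp))
        (hrange a (by simp))
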